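-- pv_equiv track=rewrite | github.com/pypi-data/pypi-mirror-354 | packages/binning-utils-sebastian-achim-mueller/binning_utils_sebastian_achim_mueller-0.0.20-py3-none-any.whl/binning_utils/power10.py | make_decade_and_bin_combinations
-- ===== SOURCE A (Python) =====
-- def make_decade_and_bin_combinations(
--     start_decade, start_bin, stop_decade, stop_bin, num_bins_per_decade=5
-- ):
--     """
--     Computes input-parameters to lower_bin_edge() in a given range.
--
--     Parameters
--     ----------
--     start_decade : int
--     start_bin : int
--     stop_decade : int
--     stop_bin : int
--     num_bins_per_decade : int
--
--     Returns
--     -------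
--     A list of input-parameters to lower_bin_edge().
--     """
--     combos = []
--
--     assert 0 <= stop_bin < num_bins_per_decade
--     assert 0 <= start_bin < num_bins_per_decade
--     assert start_decade <= stop_decade
--
--     d = start_decade
--     b = start_bin
--     while decade_bin_is_less((d, b), (stop_decade, stop_bin)):
--         combos.append((d, b))
--         d, b = decade_bin_increase(d, b, num_bins_per_decade)
--     return combos
--
-- def decade_bin_increase(decade, bin, num_bins_per_decade):
--     """
--     Returns the next higher bin-edge's (decade, bin).
--     """
--     if bin == num_bins_per_decade - 1:
--         return decade + 1, 0
--     else:
--         return decade, bin + 1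
--
-- def decade_bin_is_less(dec_bin_A, dec_bin_B):
--     decA = dec_bin_A[0]
--     decB = dec_bin_B[0]
--     binA = dec_bin_A[1]
--     binB = dec_bin_B[1]
--     if decA < decB:
--         return True
--     elif decA == decB:
--         return binA < binB
--     else:
--         return False
-- ===== SOURCE B (Python) =====
-- def make_decade_and_bin_combinations(
--     start_decade, start_bin, stop_decade, stop_bin, num_bins_per_decade=5
-- ):
--     """
--     Computes input-parameters to lower_bin_edge() in a given range.
--     """
--     assert 0 <= stop_bin < num_bins_per_decade
--     assert 0 <= start_bin < num_bins_per_decade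
--     assert start_decade <= stop_decade
--
--     start_idx = start_decade * num_bins_per_decade + start_bin
--     stop_idx = stop_decade * num_bins_per_decade + stop_bin
--     return [divmod(i, num_bins_per_decade) for i in range(start_idx, stop_idx)]
-- ===== Notes on version B (the rewrite author's own statement) =====
-- stated objective: simpler
-- what changed: Encodes each (decade, bin) pair as a single linear index, so the list is one range over [start_idx, stop_idx) decoded with divmod, replacing A's stateful while-loop with its increment and lexicographic-comparison helpers.
import Mathlib
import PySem

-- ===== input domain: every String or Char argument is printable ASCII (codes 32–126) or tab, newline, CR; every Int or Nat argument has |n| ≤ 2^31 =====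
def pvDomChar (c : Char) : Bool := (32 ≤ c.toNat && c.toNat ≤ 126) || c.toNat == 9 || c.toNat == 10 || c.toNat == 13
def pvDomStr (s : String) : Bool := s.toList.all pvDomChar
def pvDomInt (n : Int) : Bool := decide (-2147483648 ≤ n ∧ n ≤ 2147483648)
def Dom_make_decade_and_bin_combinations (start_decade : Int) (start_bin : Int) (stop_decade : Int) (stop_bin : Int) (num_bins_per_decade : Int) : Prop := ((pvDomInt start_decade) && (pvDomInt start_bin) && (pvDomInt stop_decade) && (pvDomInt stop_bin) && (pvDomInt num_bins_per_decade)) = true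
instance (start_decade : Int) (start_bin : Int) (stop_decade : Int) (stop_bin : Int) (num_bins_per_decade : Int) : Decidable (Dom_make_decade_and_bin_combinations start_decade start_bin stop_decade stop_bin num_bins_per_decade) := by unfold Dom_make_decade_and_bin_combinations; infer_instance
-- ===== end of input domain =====

-- B encodes each (decade, bin) pair as one linear index and builds the list as a
-- decoded range (divmod), replacing A's stateful while-loop with increment/compare helpers.


-- ===== PORT A =====
def decade_bin_increase (decade bin num_bins_per_decade : Int) : Int × Int :=
  if bin = num_bins_per_decade - 1 then (decade + 1, 0) else (decade, bin + 1)

def decade_bin_is_less (dec_bin_A dec_bin_B : Int × Int) : Bool :=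
  if dec_bin_A.1 < dec_bin_B.1 then true
  else if dec_bin_A.1 = dec_bin_B.1 then decide (dec_bin_A.2 < dec_bin_B.2)
  else false

-- the while-loop of A; fuel only makes it total (it is sufficient under Pre_)
def mdbLoop (stop_decade stop_bin num_bins_per_decade : Int) : Nat → Int → Int → List (Int × Int)
  | 0, _, _ => []
  | fuel + 1, d, b =>
    if decade_bin_is_less (d, b) (stop_decade, stop_bin) then
      (d, b) :: (let p := decade_bin_increase d b num_bins_per_decade
                 mdbLoop stop_decade stop_bin num_bins_per_decade fuel p.1 p.2)
    else []

def make_decade_and_bin_combinations (start_decade : Int) (start_bin : Int) (stop_decade : Int) (stop_bin : Int) (num_bins_per_decade : Int) : List (Int × Int) :=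
  mdbLoop stop_decade stop_bin num_bins_per_decade
    ((stop_decade * num_bins_per_decade + stop_bin) - (start_decade * num_bins_per_decade + start_bin)).toNat
    start_decade start_bin

-- ===== PORT B =====
def make_decade_and_bin_combinations_alt (start_decade : Int) (start_bin : Int) (stop_decade : Int) (stop_bin : Int) (num_bins_per_decade : Int) : List (Int × Int) :=
  (PySem.List.pyRange (start_decade * num_bins_per_decade + start_bin)
      (stop_decade * num_bins_per_decade + stop_bin) 1).map
    (fun i => (PySem.Int.floordiv i num_bins_per_decade, PySem.Int.mod i num_bins_per_decade))

-- ===== PRECONDITION & SPEC =====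
-- exactly the three asserts of the Python (A raises AssertionError otherwise)
def Pre_make_decade_and_bin_combinations (start_decade : Int) (start_bin : Int) (stop_decade : Int) (stop_bin : Int) (num_bins_per_decade : Int) : Prop :=
  0 ≤ stop_bin ∧ stop_bin < num_bins_per_decade ∧ 0 ≤ start_bin ∧ start_bin < num_bins_per_decade ∧ start_decade ≤ stop_decade
instance (start_decade : Int) (start_bin : Int) (stop_decade : Int) (stop_bin : Int) (num_bins_per_decade : Int) : Decidable (Pre_make_decade_and_bin_combinations start_decade start_bin stop_decade stop_bin num_bins_per_decade) := by unfold Pre_make_decade_and_bin_combinations; infer_instance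

def pvWitness_make_decade_and_bin_combinations : Int × Int × Int × Int × Int := (0, 0, 1, 2, 5)

def Spec_make_decade_and_bin_combinations (start_decade : Int) (start_bin : Int) (stop_decade : Int) (stop_bin : Int) (num_bins_per_decade : Int) (out : List (Int × Int)) : Prop := out = make_decade_and_bin_combinations_alt start_decade start_bin stop_decade stop_bin num_bins_per_decade
instance (start_decade : Int) (start_bin : Int) (stop_decade : Int) (stop_bin : Int) (num_bins_per_decade : Int) (out : List (Int × Int)) : Decidable (Spec_make_decade_and_bin_combinations start_decade start_bin stop_decade stop_bin num_bins_per_decade out) := by unfold Spec_make_decade_and_bin_combinations; infer_instance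

-- ===== CLAIM (what is proved, stated in full; the proofs are below) =====
def Claim_equal_make_decade_and_bin_combinations : Prop := ∀ (start_decade : Int) (start_bin : Int) (stop_decade : Int) (stop_bin : Int) (num_bins_per_decade : Int), Dom_make_decade_and_bin_combinations start_decade start_bin stop_decade stop_bin num_bins_per_decade → Pre_make_decade_and_bin_combinations start_decade start_bin stop_decade stop_bin num_bins_per_decade → Spec_make_decade_and_bin_combinations start_decade start_bin stop_decade stop_bin num_bins_per_decade (make_decade_and_bin_combinations start_decade start_bin stop_decade stop_bin num_bins_per_decade)

-- ===== LEMMAS AND PROOFS =====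

lemma mdbLoop_eq (td tb n : Int) (hn : 0 < n) (_htb0 : 0 ≤ tb) (htb : tb < n) :
    ∀ (fuel : Nat) (d b : Int), 0 ≤ b → b < n →
      fuel = ((td * n + tb) - (d * n + b)).toNat →
      mdbLoop td tb n fuel d b =
        (PySem.List.pyRange (d * n + b) (td * n + tb) 1).map
          (fun i => (PySem.Int.floordiv i n, PySem.Int.mod i n)) := by
  intro fuel
  induction fuel with
  | zero =>
    intro d b hb0 hbn hf
    have hle : td * n + tb ≤ d * n + b := by omega
    rw [PySem.List.pyRange_one_eq_nil hle]
    rfl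
  | succ fuel ih =>
    intro d b hb0 hbn hf
    have hlt : d * n + b < td * n + tb := by omega
    -- the lexicographic condition holds
    have hcond : decade_bin_is_less (d, b) (td, tb) = true := by
      unfold decade_bin_is_less
      by_cases h1 : d < td
      · simp [h1]
      · have hdge : td ≤ d := by omega
        have : td * n ≤ d * n := by
          exact mul_le_mul_of_nonneg_right hdge (le_of_lt hn)
        by_cases h2 : d = td
        · subst h2
          have : b < tb := by omega
          simp [this]
        · exfalso
          have hdd : td + 1 ≤ d := by omega
          have : (td + 1) * n ≤ d * n := mul_le_mul_of_nonneg_right hdd (le_of_lt hn)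
          nlinarith
    have hdec : (PySem.Int.floordiv (d * n + b) n, PySem.Int.mod (d * n + b) n) = (d, b) := by
      have hfd : PySem.Int.floordiv (d * n + b) n = d := by
        rw [PySem.Int.floordiv_eq_iff_of_pos hn]
        constructor <;> nlinarith
      have hmod := PySem.Int.floordiv_mul_add_mod (d * n + b) n
      rw [hfd] at hmod
      have : PySem.Int.mod (d * n + b) n = b := by linarith
      rw [hfd, this]
    rw [PySem.List.pyRange_one_cons hlt, List.map_cons, hdec]
    show (if decade_bin_is_less (d, b) (td, tb) then _ else _) = _
    rw [hcond, if_pos rfl]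
    congr 1
    -- step: the new state has linear index (d*n+b)+1
    unfold decade_bin_increase
    by_cases hbe : b = n - 1
    · have hidx : (d + 1) * n + 0 = d * n + b + 1 := by rw [hbe]; ring
      rw [if_pos hbe]
      show mdbLoop td tb n fuel (d + 1) 0 = _
      rw [ih (d + 1) 0 le_rfl hn (by rw [hidx]; omega), hidx]
    · rw [if_neg hbe]
      show mdbLoop td tb n fuel d (b + 1) = _
      rw [ih d (b + 1) (by omega) (by omega) (by omega)]
      congr 2
      omega

-- ===== VERDICT (by name: the statement is the Claim_ definition above) =====
theorem make_decade_and_bin_combinations_spec : Claim_equal_make_decade_and_bin_combinations := by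
  intro sd sb td tb n _hdom hpre
  obtain ⟨h1, h2, h3, h4, h5⟩ := hpre
  have hn : 0 < n := by omega
  unfold Spec_make_decade_and_bin_combinations make_decade_and_bin_combinations make_decade_and_bin_combinations_alt
  exact mdbLoop_eq td tb n hn h1 h2 _ sd sb h3 h4 rfl
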